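-- pv_equiv track=rewrite | github.com/LeikRad/LEI-UA | 1-1/FP/aula04/resolucao/ex11.py | ex11
-- ===== SOURCE A (Python) =====
-- def ex11(n):
--     div = []
--     x = 0
--     category = ""
--     for i in range(1, n):
--         if(n % i == 0):
--             div.append(i)
--     for i in div:
--         x = x + i
--
--     if(x == n):
--         category = "Número Perfeito"
--     elif(x < n):
--         category = "Número Deficiente"
--     else:
--         category = "Número Abundante"
--
--     return(div, category)
-- ===== SOURCE B (Python) =====
-- def ex11(n):
--     # Divisor pairs up to sqrt(n): O(sqrt(n)) instead of A's O(n) scan.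
--     small = []
--     large = []
--     i = 1
--     while i * i <= n:
--         if n % i == 0:
--             if i != n:
--                 small.append(i)
--             j = n // i
--             if j != i and j != n:
--                 large.append(j)
--         i += 1
--     div = small + large[::-1]
--     s = sum(div)
--     if s == n:
--         category = "Número Perfeito"
--     elif s < n:
--         category = "Número Deficiente"
--     else:
--         category = "Número Abundante"
--     return (div, category)
-- ===== Notes on version B (the rewrite author's own statement) =====
-- stated objective: faster
-- what changed: B finds divisors in complementary pairs (i, n//i) scanning i only up to sqrt(n), assembling the ascending list as small-part plus reversed large-part, instead of A's linear trial division over all of range(1, n).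
import Mathlib
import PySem

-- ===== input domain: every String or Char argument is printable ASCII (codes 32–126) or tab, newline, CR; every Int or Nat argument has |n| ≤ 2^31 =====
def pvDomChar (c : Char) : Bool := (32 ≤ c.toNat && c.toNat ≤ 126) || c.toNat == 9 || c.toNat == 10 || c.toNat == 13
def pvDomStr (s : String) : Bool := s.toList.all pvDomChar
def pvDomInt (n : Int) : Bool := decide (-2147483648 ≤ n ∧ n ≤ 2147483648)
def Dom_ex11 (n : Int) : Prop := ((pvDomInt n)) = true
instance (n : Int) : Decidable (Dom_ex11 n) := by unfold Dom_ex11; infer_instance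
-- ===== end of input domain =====

-- B lists proper divisors by complementary pairs (i, n//i) for i up to √n instead of A's
-- full scan of range(1, n); same return value.

-- ===== PORT A =====
def ex11 (n : Int) : List Int × String :=
  let div := (PySem.List.pyRange 1 n 1).foldl
    (fun acc i => if PySem.Int.mod n i = 0 then acc ++ [i] else acc) []
  let x := div.foldl (fun acc i => acc + i) 0
  let category :=
    if x = n then "Número Perfeito"
    else if x < n then "Número Deficiente"
    else "Número Abundante"
  (div, category)

-- ===== PORT B =====
-- the while loop 'i = 1; while i*i <= n: …; i += 1' as recursion on i;
-- returns (small divisors, ascending; large companions n//i, descending)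
def ex11DivPairs (n i : Int) : List Int × List Int :=
  if i * i ≤ n then
    let p := ex11DivPairs n (i + 1)
    if PySem.Int.mod n i = 0 then
      ((if i ≠ n then i :: p.1 else p.1),
       (if PySem.Int.floordiv n i ≠ i ∧ PySem.Int.floordiv n i ≠ n then
          PySem.Int.floordiv n i :: p.2 else p.2))
    else p
  else ([], [])
termination_by (n + 1 - i).toNat
decreasing_by
  have h0 : (0:Int) ≤ i * i := mul_self_nonneg i
  have h2 : i * i ≥ 2 * i - 1 := by nlinarith [sq_nonneg (i - 1)]
  omega

def ex11_alt (n : Int) : List Int × String :=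
  let p := ex11DivPairs n 1
  let div := p.1 ++ p.2.reverse
  let s := div.foldl (fun acc i => acc + i) 0
  let category :=
    if s = n then "Número Perfeito"
    else if s < n then "Número Deficiente"
    else "Número Abundante"
  (div, category)

-- ===== PRECONDITION & SPEC =====
def Spec_ex11 (n : Int) (out : List Int × String) : Prop := out = ex11_alt n
instance (n : Int) (out : List Int × String) : Decidable (Spec_ex11 n out) := by unfold Spec_ex11; infer_instance

-- ===== CLAIM (what is proved, stated in full; the proofs are below) =====
def Claim_equal_ex11 : Prop := ∀ (n : Int), Dom_ex11 n → Spec_ex11 n (ex11 n)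

-- ===== LEMMAS AND PROOFS =====

-- membership in the small-divisor list of the pair scan
lemma mem_pairs_fst (n i d : Int) :
    1 ≤ i → (d ∈ (ex11DivPairs n i).1 ↔
      i ≤ d ∧ d * d ≤ n ∧ PySem.Int.mod n d = 0 ∧ d ≠ n) := by
  fun_induction ex11DivPairs n i with
  | case1 i hle p hmod ih =>
    intro hi
    have IH := ih (by omega)
    show d ∈ (if i ≠ n then i :: (ex11DivPairs n (i+1)).1 else (ex11DivPairs n (i+1)).1) ↔ _
    by_cases hin : i ≠ n
    · rw [if_pos hin]
      simp only [List.mem_cons, IH]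
      constructor
      · rintro (rfl | ⟨h1,h2,h3,h4⟩)
        · exact ⟨le_refl _, hle, hmod, hin⟩
        · exact ⟨by omega, h2, h3, h4⟩
      · rintro ⟨h1,h2,h3,h4⟩
        rcases eq_or_lt_of_le h1 with rfl | hlt
        · exact Or.inl rfl
        · exact Or.inr ⟨by omega, h2, h3, h4⟩
    · rw [if_neg hin, IH]
      have hin' : i = n := not_ne_iff.mp hin
      constructor
      · rintro ⟨h1,h2,h3,h4⟩; exact ⟨by omega, h2, h3, h4⟩
      · rintro ⟨h1,h2,h3,h4⟩
        refine ⟨?_, h2, h3, h4⟩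
        rcases eq_or_lt_of_le h1 with rfl | hlt
        · exact absurd hin' h4
        · omega
  | case2 i hle p hmod ih =>
    intro hi
    show d ∈ (ex11DivPairs n (i+1)).1 ↔ _
    rw [ih (by omega)]
    constructor
    · rintro ⟨h1,h2,h3,h4⟩; exact ⟨by omega, h2, h3, h4⟩
    · rintro ⟨h1,h2,h3,h4⟩
      rcases eq_or_lt_of_le h1 with rfl | hlt
      · exact absurd h3 hmod
      · exact ⟨by omega, h2, h3, h4⟩
  | case3 i hle =>
    intro hi
    simp only [List.not_mem_nil, false_iff]
    rintro ⟨h1,h2,h3,h4⟩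
    have : i * i ≤ d * d := by nlinarith
    omega

-- membership in the large-companion list of the pair scan
lemma mem_pairs_snd (n i d : Int) :
    1 ≤ i → (d ∈ (ex11DivPairs n i).2 ↔
      ∃ e, i ≤ e ∧ e * e ≤ n ∧ PySem.Int.mod n e = 0 ∧
        d = PySem.Int.floordiv n e ∧ d ≠ e ∧ d ≠ n) := by
  fun_induction ex11DivPairs n i with
  | case1 i hle p hmod ih =>
    intro hi
    have IH := ih (by omega)
    show d ∈ (if PySem.Int.floordiv n i ≠ i ∧ PySem.Int.floordiv n i ≠ n then
          PySem.Int.floordiv n i :: (ex11DivPairs n (i+1)).2 else (ex11DivPairs n (i+1)).2) ↔ _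
    by_cases hc : PySem.Int.floordiv n i ≠ i ∧ PySem.Int.floordiv n i ≠ n
    · rw [if_pos hc]
      simp only [List.mem_cons, IH]
      constructor
      · rintro (rfl | ⟨e, he1, he2, he3, he4, he5, he6⟩)
        · exact ⟨i, le_refl _, hle, hmod, rfl, hc.1, hc.2⟩
        · exact ⟨e, by omega, he2, he3, he4, he5, he6⟩
      · rintro ⟨e, he1, he2, he3, he4, he5, he6⟩
        rcases eq_or_lt_of_le he1 with rfl | hlt
        · exact Or.inl he4
        · exact Or.inr ⟨e, by omega, he2, he3, he4, he5, he6⟩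
    · rw [if_neg hc, IH]
      constructor
      · rintro ⟨e, he1, he2, he3, he4, he5, he6⟩
        exact ⟨e, by omega, he2, he3, he4, he5, he6⟩
      · rintro ⟨e, he1, he2, he3, he4, he5, he6⟩
        rcases eq_or_lt_of_le he1 with rfl | hlt
        · exact absurd ⟨he4 ▸ he5, he4 ▸ he6⟩ hc
        · exact ⟨e, by omega, he2, he3, he4, he5, he6⟩
  | case2 i hle p hmod ih =>
    intro hi
    show d ∈ (ex11DivPairs n (i+1)).2 ↔ _
    rw [ih (by omega)]
    constructor
    · rintro ⟨e, he1, he2, he3, he4, he5, he6⟩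
      exact ⟨e, by omega, he2, he3, he4, he5, he6⟩
    · rintro ⟨e, he1, he2, he3, he4, he5, he6⟩
      rcases eq_or_lt_of_le he1 with rfl | hlt
      · exact absurd he3 hmod
      · exact ⟨e, by omega, he2, he3, he4, he5, he6⟩
  | case3 i hle =>
    intro hi
    simp only [List.not_mem_nil, false_iff]
    rintro ⟨e, he1, he2, he3, he4, he5, he6⟩
    have : i * i ≤ e * e := by nlinarith
    omega

-- d is a large companion iff d is a proper divisor above the square root
lemma snd_char (n d : Int) :
    (∃ e, 1 ≤ e ∧ e * e ≤ n ∧ PySem.Int.mod n e = 0 ∧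
        d = PySem.Int.floordiv n e ∧ d ≠ e ∧ d ≠ n) ↔
      (1 ≤ d ∧ d < n ∧ PySem.Int.mod n d = 0 ∧ n < d * d) := by
  constructor
  · rintro ⟨e, he1, he2, he3, rfl, he5, he6⟩
    have hepos : (0:Int) < e := he1
    have hdvd : e ∣ n := (PySem.Int.mod_eq_zero_iff_dvd n e).mp he3
    have hfd : PySem.Int.floordiv n e = n / e := PySem.Int.floordiv_eq_ediv_of_pos hepos
    have hED : e * (PySem.Int.floordiv n e) = n := by
      rw [hfd]; exact Int.mul_ediv_cancel' hdvd
    set d' := PySem.Int.floordiv n e with hd'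
    have hn1 : (1:Int) ≤ n := le_trans (by nlinarith) he2
    have hd1 : 1 ≤ d' := by nlinarith
    have hdn : d' ≤ n := by nlinarith
    have hed : e ≤ d' := by nlinarith
    have hlt : e < d' := lt_of_le_of_ne hed (Ne.symm he5)
    refine ⟨hd1, lt_of_le_of_ne hdn he6, ?_, by nlinarith⟩
    exact (PySem.Int.mod_eq_zero_iff_dvd n d').mpr ⟨e, by rw [← hED]; ring⟩
  · rintro ⟨h1, h2, h3, h4⟩
    have hdvd : d ∣ n := (PySem.Int.mod_eq_zero_iff_dvd n d).mp h3
    have hdpos : (0:Int) < d := h1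
    set e := n / d with he
    have hED : d * e = n := Int.mul_ediv_cancel' hdvd
    have hn1 : (1:Int) ≤ n := by omega
    have he1 : 1 ≤ e := by nlinarith
    have hed : e < d := by nlinarith
    refine ⟨e, he1, by nlinarith,
      (PySem.Int.mod_eq_zero_iff_dvd n e).mpr ⟨d, by rw [← hED]; ring⟩, ?_, by omega, by omega⟩
    have hfe : PySem.Int.floordiv n e = n / e := PySem.Int.floordiv_eq_ediv_of_pos he1
    rw [hfe, ← hED, mul_comm, Int.mul_ediv_cancel_left _ (by omega)]

lemma pairwise_fst (n i : Int) :
    1 ≤ i → (ex11DivPairs n i).1.Pairwise (· < ·) := by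
  fun_induction ex11DivPairs n i with
  | case1 i hle p hmod ih =>
    intro hi
    have IH := ih (by omega)
    show ((if i ≠ n then i :: (ex11DivPairs n (i+1)).1 else (ex11DivPairs n (i+1)).1)).Pairwise (· < ·)
    by_cases hin : i ≠ n
    · rw [if_pos hin]
      refine List.pairwise_cons.mpr ⟨?_, IH⟩
      intro b hb
      have := ((mem_pairs_fst n (i+1) b) (by omega)).mp hb
      omega
    · rw [if_neg hin]; exact IH
  | case2 i hle p hmod ih =>
    intro hi
    exact ih (by omega)
  | case3 i hle => intro hi; exact List.Pairwise.nil

lemma pairwise_snd (n i : Int) :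
    1 ≤ i → (ex11DivPairs n i).2.Pairwise (fun a b => b < a) := by
  fun_induction ex11DivPairs n i with
  | case1 i hle p hmod ih =>
    intro hi
    have IH := ih (by omega)
    show ((if PySem.Int.floordiv n i ≠ i ∧ PySem.Int.floordiv n i ≠ n then
          PySem.Int.floordiv n i :: (ex11DivPairs n (i+1)).2 else (ex11DivPairs n (i+1)).2)).Pairwise _
    by_cases hc : PySem.Int.floordiv n i ≠ i ∧ PySem.Int.floordiv n i ≠ n
    · rw [if_pos hc]
      refine List.pairwise_cons.mpr ⟨?_, IH⟩
      intro b hb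
      obtain ⟨e, he1, he2, he3, rfl, he5, he6⟩ := ((mem_pairs_snd n (i+1) b) (by omega)).mp hb
      have hipos : (0:Int) < i := hi
      have hepos : (0:Int) < e := by omega
      have hdvdi : i ∣ n := (PySem.Int.mod_eq_zero_iff_dvd n i).mp hmod
      have hdvde : e ∣ n := (PySem.Int.mod_eq_zero_iff_dvd n e).mp he3
      have hfi : PySem.Int.floordiv n i = n / i := PySem.Int.floordiv_eq_ediv_of_pos hipos
      have hfe : PySem.Int.floordiv n e = n / e := PySem.Int.floordiv_eq_ediv_of_pos hepos
      have hEi : i * (PySem.Int.floordiv n i) = n := by rw [hfi]; exact Int.mul_ediv_cancel' hdvdi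
      have hEe : e * (PySem.Int.floordiv n e) = n := by rw [hfe]; exact Int.mul_ediv_cancel' hdvde
      set c := PySem.Int.floordiv n i
      set b := PySem.Int.floordiv n e
      have hn1 : (1:Int) ≤ n := by nlinarith
      have hb1 : 1 ≤ b := by nlinarith
      have hie : i + 1 ≤ e := he1
      nlinarith
    · rw [if_neg hc]; exact IH
  | case2 i hle p hmod ih =>
    intro hi
    exact ih (by omega)
  | case3 i hle => intro hi; exact List.Pairwise.nil

lemma mem_snd_one (n d : Int) :
    d ∈ (ex11DivPairs n 1).2 ↔ (1 ≤ d ∧ d < n ∧ PySem.Int.mod n d = 0 ∧ n < d * d) := by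
  rw [mem_pairs_snd n 1 d le_rfl]; exact snd_char n d

lemma listB_mem (n d : Int) :
    d ∈ (ex11DivPairs n 1).1 ++ (ex11DivPairs n 1).2.reverse ↔
      (1 ≤ d ∧ d < n ∧ PySem.Int.mod n d = 0) := by
  rw [List.mem_append, List.mem_reverse, mem_pairs_fst n 1 d le_rfl, mem_snd_one]
  constructor
  · rintro (⟨h1,h2,h3,h4⟩ | ⟨h1,h2,h3,h4⟩)
    · refine ⟨h1, ?_, h3⟩
      have : d ≤ d * d := by nlinarith
      rcases lt_or_eq_of_le (le_trans this h2) with h | h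
      · exact h
      · exact absurd h h4
    · exact ⟨h1, h2, h3⟩
  · rintro ⟨h1, h2, h3⟩
    by_cases hdd : d * d ≤ n
    · exact Or.inl ⟨h1, hdd, h3, by omega⟩
    · exact Or.inr ⟨h1, h2, h3, by omega⟩

lemma listB_pairwise (n : Int) :
    ((ex11DivPairs n 1).1 ++ (ex11DivPairs n 1).2.reverse).Pairwise (· < ·) := by
  rw [List.pairwise_append]
  refine ⟨pairwise_fst n 1 le_rfl, List.pairwise_reverse.mpr (pairwise_snd n 1 le_rfl), ?_⟩
  intro a ha b hb
  rw [List.mem_reverse] at hb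
  have hA := (mem_pairs_fst n 1 a le_rfl).mp ha
  have hB := (mem_snd_one n b).mp hb
  nlinarith [hA.1, hA.2.1, hB.1, hB.2.2.2]

lemma listA_char (n : Int) :
    (PySem.List.pyRange 1 n 1).foldl
      (fun acc i => if PySem.Int.mod n i = 0 then acc ++ [i] else acc) [] =
    (PySem.List.pyRange 1 n 1).filter (fun i => decide (PySem.Int.mod n i = 0)) := by
  rw [PySem.List.foldl_append_ite_eq_filter]
  simp

-- both programs build the same strictly increasing list of proper divisors
lemma lists_eq (n : Int) :
    (PySem.List.pyRange 1 n 1).foldl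
      (fun acc i => if PySem.Int.mod n i = 0 then acc ++ [i] else acc) [] =
    (ex11DivPairs n 1).1 ++ (ex11DivPairs n 1).2.reverse := by
  rw [listA_char]
  have pwA : ((PySem.List.pyRange 1 n 1).filter
      (fun i => decide (PySem.Int.mod n i = 0))).Pairwise (· < ·) :=
    (PySem.List.pairwise_lt_pyRange_one 1 n).sublist (List.filter_sublist)
  have pwB := listB_pairwise n
  have memiff : ∀ d, d ∈ (PySem.List.pyRange 1 n 1).filter
      (fun i => decide (PySem.Int.mod n i = 0)) ↔
      d ∈ (ex11DivPairs n 1).1 ++ (ex11DivPairs n 1).2.reverse := by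
    intro d
    rw [List.mem_filter, PySem.List.mem_pyRange_one, listB_mem, decide_eq_true_eq]
    tauto
  have perm := (List.perm_ext_iff_of_nodup pwA.nodup pwB.nodup).mpr memiff
  exact perm.eq_of_pairwise (fun a b _ _ hab hba => ((lt_asymm hab) hba).elim) pwA pwB

-- ===== VERDICT (by name: the statement is the Claim_ definition above) =====
theorem ex11_spec : Claim_equal_ex11 := by
  intro n _
  show ex11 n = ex11_alt n
  simp only [ex11, ex11_alt]
  rw [lists_eq n]
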